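-- pv_equiv track=rewrite | github.com/Danpun9/Baekjoon | Python/백준/Silver/31801. 증가와 감소/증가와 감소.py | check
-- ===== SOURCE A (Python) =====
-- def check(n):
--     s = str(n)
--     length = len(s)
--     if length < 3:
--         return False
--
--     # 증가 구간
--     idx = 0
--     while idx + 1 < length and s[idx] < s[idx + 1]:
--         idx += 1
--
--     # 증가 또는 감소만 존재
--     if idx == 0 or idx == length - 1:
--         return False
--
--     # 감소 구간
--     while idx + 1 < length and s[idx] > s[idx + 1]:
--         idx += 1
--
--     return idx == length - 1
-- ===== SOURCE B (Python) =====
-- def check(n):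
--     s = str(n)
--     if len(s) < 3:
--         return False
--     cs = ['<' if a < b else ('>' if a > b else '=') for a, b in zip(s, s[1:])]
--     u = cs.count('<')
--     d = cs.count('>')
--     return '=' not in cs and u >= 1 and d >= 1 and cs == ['<'] * u + ['>'] * d
-- ===== Notes on version B (the rewrite author's own statement) =====
-- stated objective: alternative
-- what changed: Instead of walking a peak index through two sequential while-loops, B materialises the full adjacent-comparison sequence in one pass and checks its global shape (no '=', at least one '<' and one '>', all '<' before all '>').
import Mathlib
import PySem

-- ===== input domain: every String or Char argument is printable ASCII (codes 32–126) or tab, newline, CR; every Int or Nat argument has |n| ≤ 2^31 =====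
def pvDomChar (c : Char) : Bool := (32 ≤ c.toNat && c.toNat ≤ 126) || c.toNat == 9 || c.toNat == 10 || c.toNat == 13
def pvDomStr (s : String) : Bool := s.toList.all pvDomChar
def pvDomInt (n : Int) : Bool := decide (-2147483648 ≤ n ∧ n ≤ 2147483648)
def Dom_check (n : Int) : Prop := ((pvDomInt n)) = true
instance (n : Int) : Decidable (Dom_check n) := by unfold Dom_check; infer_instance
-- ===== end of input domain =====

-- B re-implements A by materialising the adjacent-comparison sequence in one pass and
-- checking its global shape, instead of A's two sequential while-loops over a peak index.

-- ===== PORT A =====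
-- the first while loop: walks forward while s[idx] < s[idx+1]; returns (idx, s[idx], remaining tail)
def upLoop : Char → List Char → Nat → Nat × Char × List Char
  | a, b :: rest, idx => if a < b then upLoop b rest (idx + 1) else (idx, a, b :: rest)
  | a, [], idx => (idx, a, [])

-- the second while loop: walks forward while s[idx] > s[idx+1]; returns final idx
def downLoop : Char → List Char → Nat → Nat
  | a, b :: rest, idx => if b < a then downLoop b rest (idx + 1) else idx
  | _, [], idx => idx

def check (n : Int) : Bool :=
  let s := PySem.Int.toChars n        -- s = str(n), as its character list
  let length := s.length
  if length < 3 then false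
  else
    match s with
    | [] => false                      -- unreachable: length ≥ 3
    | a :: rest =>
      let r := upLoop a rest 0
      let idx := r.1
      if idx = 0 ∨ idx = length - 1 then false
      else downLoop r.2.1 r.2.2 idx == length - 1

-- ===== PORT B =====
-- '<' if a < b else ('>' if a > b else '=')
def cmpc (a b : Char) : Char := if a < b then '<' else if b < a then '>' else '='

def check_alt (n : Int) : Bool :=
  let s := PySem.Int.toChars n        -- s = str(n), as its character list
  if s.length < 3 then false
  else
    let cs := (s.zip (s.drop 1)).map (fun p => cmpc p.1 p.2)
    let u := cs.count '<'
    let d := cs.count '>'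
    !cs.contains '=' && decide (1 ≤ u) && decide (1 ≤ d)
      && (cs == List.replicate u '<' ++ List.replicate d '>')

-- ===== PRECONDITION & SPEC =====
def Spec_check (n : Int) (out : Bool) : Prop := out = check_alt n
instance (n : Int) (out : Bool) : Decidable (Spec_check n out) := by unfold Spec_check; infer_instance

-- ===== CLAIM (what is proved, stated in full; the proofs are below) =====
def Claim_equal_check : Prop := ∀ (n : Int), Dom_check n → Spec_check n (check n)

-- ===== LEMMAS AND PROOFS =====

-- the comparison sequence of a nonempty string a :: r
def csL : Char → List Char → List Char
  | _, [] => []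
  | a, b :: r => cmpc a b :: csL b r

lemma zip_cs : ∀ (r : List Char) (a : Char),
    ((a :: r).zip r).map (fun p => cmpc p.1 p.2) = csL a r := by
  intro r
  induction r with
  | nil => intro a; rfl
  | cons b r ih =>
    intro a
    show (((a, b) :: (b :: r).zip r).map (fun p => cmpc p.1 p.2)) = cmpc a b :: csL b r
    rw [List.map_cons, ih b]

lemma csL_length : ∀ (r : List Char) (a : Char), (csL a r).length = r.length := by
  intro r
  induction r with
  | nil => intro a; rfl
  | cons b r ih => intro a; simp [csL, ih b]

lemma up_spec : ∀ (r : List Char) (a : Char) (idx : Nat),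
    (upLoop a r idx).1 = idx + ((csL a r).takeWhile (· == '<')).length ∧
    csL (upLoop a r idx).2.1 (upLoop a r idx).2.2 = (csL a r).dropWhile (· == '<') := by
  intro r
  induction r with
  | nil => intro a idx; simp [upLoop, csL]
  | cons b r ih =>
    intro a idx
    by_cases h : a < b
    · have hc : cmpc a b = '<' := by simp [cmpc, h]
      have := ih b (idx + 1)
      simp [upLoop, h, csL, hc, this.1, this.2]
      omega
    · have hc : cmpc a b ≠ '<' := by
        simp [cmpc, h]
        split <;> simp
      simp [upLoop, h, csL, hc]

lemma down_spec : ∀ (r : List Char) (a : Char) (idx : Nat),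
    downLoop a r idx = idx + ((csL a r).takeWhile (· == '>')).length := by
  intro r
  induction r with
  | nil => intro a idx; simp [downLoop, csL]
  | cons b r ih =>
    intro a idx
    by_cases h : b < a
    · have hc : cmpc a b = '>' := by
        have : ¬ a < b := by
          intro hab; exact absurd (lt_trans h hab) (lt_irrefl b)
        simp [cmpc, this, h]
      simp [downLoop, h, csL, hc, ih b (idx + 1)]
      omega
    · have hc : cmpc a b ≠ '>' := by
        simp [cmpc]
        split
        · simp
        · simp
      simp [downLoop, h, csL, hc]

lemma tw_append_replicate (p : Char → Bool) (c : Char) (hp : p c = true) :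
    ∀ (u : Nat) (l : List Char),
      (List.replicate u c ++ l).takeWhile p = List.replicate u c ++ l.takeWhile p ∧
      (List.replicate u c ++ l).dropWhile p = l.dropWhile p := by
  intro u
  induction u with
  | zero => intro l; simp
  | succ u ih =>
    intro l
    simp [List.replicate_succ, hp, (ih l).1, (ih l).2]

-- the core shape lemma: A's two-phase index walk, read off the comparison sequence,
-- equals B's global shape test, for ANY list of characters cs
lemma shape (cs : List Char) :
    ((if (cs.takeWhile (· == '<')).length = 0 ∨ (cs.takeWhile (· == '<')).length = cs.length
      then false
      else ((cs.takeWhile (· == '<')).length +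
            ((cs.dropWhile (· == '<')).takeWhile (· == '>')).length == cs.length : Bool)))
    = (!cs.contains '=' && decide (1 ≤ cs.count '<') && decide (1 ≤ cs.count '>')
        && (cs == List.replicate (cs.count '<') '<' ++ List.replicate (cs.count '>') '>')) := by
  rw [Bool.eq_iff_iff]
  set tw := cs.takeWhile (· == '<') with htw
  set dw := cs.dropWhile (· == '<') with hdw
  have hsplit : tw ++ dw = cs := List.takeWhile_append_dropWhile
  have htwrep : tw = List.replicate tw.length '<' := by
    apply List.eq_replicate_of_mem
    intro b hb
    have := List.mem_takeWhile_imp hb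
    simpa using this
  constructor
  · intro h
    split at h
    · simp at h
    · rename_i hk
      simp only [beq_iff_eq] at h
      have hlen : cs.length = tw.length + dw.length := by
        rw [← hsplit]; simp
      have hdwlen : ((dw.takeWhile (· == '>')).length) = dw.length := by omega
      have hdweq : dw.takeWhile (· == '>') = dw :=
        (List.takeWhile_prefix _).eq_of_length hdwlen
      have hdwall : ∀ b ∈ dw, b = '>' := by
        intro b hb
        rw [← hdweq] at hb
        have := List.mem_takeWhile_imp hb
        simpa using this
      have hdwrep : dw = List.replicate dw.length '>' := List.eq_replicate_of_mem hdwall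
      have hcs : cs = List.replicate tw.length '<' ++ List.replicate dw.length '>' := by
        rw [← hsplit, ← htwrep, ← hdwrep]
      have hcu : cs.count '<' = tw.length := by
        rw [hcs]; simp [List.count_append, List.count_replicate]
      have hcd : cs.count '>' = dw.length := by
        rw [hcs]; simp [List.count_append, List.count_replicate]
      have hne : ¬ ('=' ∈ cs) := by
        rw [hcs]
        simp [List.mem_append, List.mem_replicate]
      rw [not_or] at hk
      obtain ⟨hk0, hkl⟩ := hk
      simp only [Bool.and_eq_true, Bool.not_eq_true', beq_iff_eq, decide_eq_true_eq]
      refine ⟨⟨⟨?_, by omega⟩, by omega⟩, ?_⟩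
      · simpa using hne
      · rw [hcu, hcd, ← hcs]
  · intro h
    simp only [Bool.and_eq_true, Bool.not_eq_true', beq_iff_eq, decide_eq_true_eq] at h
    obtain ⟨⟨⟨hne, hu⟩, hd⟩, hcs⟩ := h
    set u := cs.count '<' with hu'
    set d := cs.count '>' with hd'
    have htweq : tw = List.replicate u '<' := by
      rw [htw, hcs, (tw_append_replicate (· == '<') '<' (by simp) u _).1]
      have : (List.replicate d '>').takeWhile (· == '<') = [] := by
        cases d with
        | zero => simp
        | succ d => simp [List.replicate_succ]
      rw [this, List.append_nil]
    have hdweq : dw = List.replicate d '>' := by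
      rw [hdw, hcs, (tw_append_replicate (· == '<') '<' (by simp) u _).2]
      cases d with
      | zero => simp
      | succ d => simp [List.replicate_succ]
    have hk1 : tw.length = u := by rw [htweq]; simp
    have hlen : cs.length = u + d := by rw [hcs]; simp
    have hdwtw : (dw.takeWhile (· == '>')).length = d := by
      rw [hdweq]
      have : (List.replicate d '>').takeWhile (· == '>') = List.replicate d '>' := by
        have h2 := (tw_append_replicate (· == '>') '>' (by simp) d []).1
        simp only [List.append_nil, List.takeWhile_nil] at h2
        exact h2
      rw [this]; simp
    rw [if_neg (by omega)]
    simp only [beq_iff_eq]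
    omega

-- ===== VERDICT (by name: the statement is the Claim_ definition above) =====
theorem check_spec : Claim_equal_check := by
  intro n _
  show check n = check_alt n
  unfold check check_alt
  generalize PySem.Int.toChars n = s
  by_cases hlen : s.length < 3
  · simp [hlen]
  · cases s with
    | nil => simp at hlen
    | cons a rest =>
      simp only [hlen, if_false]
      rw [show List.drop 1 (a :: rest) = rest from rfl, zip_cs rest a]
      have hup := up_spec rest a 0
      have hdown := down_spec ((upLoop a rest 0).2.2) ((upLoop a rest 0).2.1) ((upLoop a rest 0).1)
      rw [hup.2] at hdown
      have hlcs : (csL a rest).length = rest.length := csL_length rest a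
      have hlen1 : (a :: rest).length - 1 = (csL a rest).length := by simp [hlcs]
      rw [hdown, hup.1] at *
      rw [hlen1]
      simp only [Nat.zero_add]
      exact shape (csL a rest)
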